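-- pv_equiv track=rewrite | github.com/linsok/CluboraX | backend/apps/ai_advisor/views.py | _rule_based_response
-- ===== SOURCE A (Python) =====
-- CHAT_RESPONSES = {
--     'event': [
--         "For successful events, ensure you have a clear objective, sufficient budget, and proper venue arrangements.",
--         "Consider your target audience when planning event activities and scheduling.",
--         "Make sure to promote your event at least 2 weeks in advance through multiple channels.",
--         "Document all event requirements including equipment, volunteers, and logistics.",
--         "Always have a contingency plan for unexpected situations during the event.",
--     ],
--     'club': [
--         "A strong club needs clear goals, active membership, and regular activities.",
--         "Define your club's mission statement and values to attract like-minded members.",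
--         "Plan at least one major event per semester to maintain member engagement.",
--         "Create a structured leadership hierarchy with clear roles and responsibilities.",
--         "Budget planning is critical — track all income and expenditure carefully.",
--     ],
--     'budget': [
--         "Start with a detailed budget breakdown to avoid overspending.",
--         "Always include a contingency buffer of 10-15% for unexpected costs.",
--         "Look for sponsorship opportunities to supplement your budget.",
--         "Track all expenses in real-time and compare against your budget monthly.",
--         "Prioritize essential expenses before allocating funds to optional items.",
--     ],
--     'policy': [
--         "Review campus policies regularly to ensure your activities remain compliant.",
--         "All club activities must be approved by the student affairs office.",
--         "Ensure all events comply with venue capacity and safety regulations.",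
--         "Financial transactions must follow university procurement guidelines.",
--         "Maintain accurate records of all club activities for audit purposes.",
--     ],
--     'general': [
--         "I'm here to help with event planning, club management, budget advice, and policy guidance.",
--         "You can ask me about best practices for organizing events or managing clubs.",
--         "Need help with a specific aspect of your club or event? I can provide targeted advice.",
--         "I can analyze proposals and suggest improvements to help ensure success.",
--         "Feel free to ask about policies, budgets, member recruitment, or event logistics.",
--     ],
-- }
--
-- def _rule_based_response(message: str, mode: str) -> str:
--     """Return a simple rule-based response for a chat message."""
--     message_lower = message.lower()
--     if any(w in message_lower for w in ['event', 'organize', 'schedule', 'venue', 'activity']):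
--         bucket = 'event'
--     elif any(w in message_lower for w in ['club', 'member', 'recruitment', 'leader']):
--         bucket = 'club'
--     elif any(w in message_lower for w in ['budget', 'cost', 'fund', 'spend', 'expense', 'money']):
--         bucket = 'budget'
--     elif any(w in message_lower for w in ['policy', 'rule', 'regulation', 'compliance', 'guideline']):
--         bucket = 'policy'
--     else:
--         bucket = mode if mode in CHAT_RESPONSES else 'general'
--
--     responses = CHAT_RESPONSES[bucket]
--     # Rotate through responses based on message length to add variety
--     index = len(message) % len(responses)
--     return responses[index]
-- ===== SOURCE B (Python) =====
-- CHAT_RESPONSES = {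
--     'event': [
--         "For successful events, ensure you have a clear objective, sufficient budget, and proper venue arrangements.",
--         "Consider your target audience when planning event activities and scheduling.",
--         "Make sure to promote your event at least 2 weeks in advance through multiple channels.",
--         "Document all event requirements including equipment, volunteers, and logistics.",
--         "Always have a contingency plan for unexpected situations during the event.",
--     ],
--     'club': [
--         "A strong club needs clear goals, active membership, and regular activities.",
--         "Define your club's mission statement and values to attract like-minded members.",
--         "Plan at least one major event per semester to maintain member engagement.",
--         "Create a structured leadership hierarchy with clear roles and responsibilities.",
--         "Budget planning is critical — track all income and expenditure carefully.",
--     ],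
--     'budget': [
--         "Start with a detailed budget breakdown to avoid overspending.",
--         "Always include a contingency buffer of 10-15% for unexpected costs.",
--         "Look for sponsorship opportunities to supplement your budget.",
--         "Track all expenses in real-time and compare against your budget monthly.",
--         "Prioritize essential expenses before allocating funds to optional items.",
--     ],
--     'policy': [
--         "Review campus policies regularly to ensure your activities remain compliant.",
--         "All club activities must be approved by the student affairs office.",
--         "Ensure all events comply with venue capacity and safety regulations.",
--         "Financial transactions must follow university procurement guidelines.",
--         "Maintain accurate records of all club activities for audit purposes.",
--     ],
--     'general': [
--         "I'm here to help with event planning, club management, budget advice, and policy guidance.",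
--         "You can ask me about best practices for organizing events or managing clubs.",
--         "Need help with a specific aspect of your club or event? I can provide targeted advice.",
--         "I can analyze proposals and suggest improvements to help ensure success.",
--         "Feel free to ask about policies, budgets, member recruitment, or event logistics.",
--     ],
-- }
--
-- # Keyword groups numbered by priority (0 = highest); names of those priorities.
-- _PRIORITY_KEYWORDS = [
--     (0, ['event', 'organize', 'schedule', 'venue', 'activity']),
--     (1, ['club', 'member', 'recruitment', 'leader']),
--     (2, ['budget', 'cost', 'fund', 'spend', 'expense', 'money']),
--     (3, ['policy', 'rule', 'regulation', 'compliance', 'guideline']),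
-- ]
-- _BUCKET_NAMES = ['event', 'club', 'budget', 'policy']
--
--
-- def _rule_based_response(message: str, mode: str) -> str:
--     """Return a simple rule-based response for a chat message."""
--     ml = message.lower()
--     # Single left-to-right scan over the message: at each position, see which
--     # keyword groups start there and keep the best (lowest) priority seen.
--     best = None
--     for i in range(len(ml)):
--         for prio, kws in _PRIORITY_KEYWORDS:
--             if any(ml.startswith(w, i) for w in kws) and (best is None or prio < best):
--                 best = prio
--     if best is not None:
--         bucket = _BUCKET_NAMES[best]
--     else:
--         bucket = mode if mode in CHAT_RESPONSES else 'general'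
--     responses = CHAT_RESPONSES[bucket]
--     return responses[len(message) % len(responses)]
-- ===== Notes on version B (the rewrite author's own statement) =====
-- stated objective: alternative
-- what changed: Instead of testing each keyword with a substring 'in' check through an if/elif chain, B makes a single left-to-right scan over the positions of the lowered message, checking which keyword groups start at each position and keeping the minimum (best) matched priority in an accumulator; the priority maps to the bucket name, with the same mode fallback and length-mod rotation.
import Mathlib
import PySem

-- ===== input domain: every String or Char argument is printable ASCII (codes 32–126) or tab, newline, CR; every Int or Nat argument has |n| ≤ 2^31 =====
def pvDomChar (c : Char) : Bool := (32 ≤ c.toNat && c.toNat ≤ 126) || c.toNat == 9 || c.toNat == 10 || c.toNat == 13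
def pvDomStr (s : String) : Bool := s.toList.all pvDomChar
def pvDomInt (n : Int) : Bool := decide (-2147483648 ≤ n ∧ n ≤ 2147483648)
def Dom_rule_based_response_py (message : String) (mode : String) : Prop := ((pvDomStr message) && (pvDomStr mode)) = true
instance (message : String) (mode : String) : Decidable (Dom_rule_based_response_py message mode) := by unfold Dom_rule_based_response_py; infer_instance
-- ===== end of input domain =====

-- B replaces A's per-keyword substring (`in`) tests and if/elif chain by a single
-- left-to-right positional scan of the message keeping the best (lowest) matched
-- keyword-group priority (objective: alternative; same asymptotic cost).

-- ===== PORT A =====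
-- the module constant CHAT_RESPONSES (shared data, used by both ports)
def chatResponses : PySem.Dict String (List String) := PySem.Dict.ofList [
  ("event",
   ["For successful events, ensure you have a clear objective, sufficient budget, and proper venue arrangements.",
     "Consider your target audience when planning event activities and scheduling.",
     "Make sure to promote your event at least 2 weeks in advance through multiple channels.",
     "Document all event requirements including equipment, volunteers, and logistics.",
     "Always have a contingency plan for unexpected situations during the event."]),
  ("club",
   ["A strong club needs clear goals, active membership, and regular activities.",
     "Define your club's mission statement and values to attract like-minded members.",
     "Plan at least one major event per semester to maintain member engagement.",
     "Create a structured leadership hierarchy with clear roles and responsibilities.",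
     "Budget planning is critical — track all income and expenditure carefully."]),
  ("budget",
   ["Start with a detailed budget breakdown to avoid overspending.",
     "Always include a contingency buffer of 10-15% for unexpected costs.",
     "Look for sponsorship opportunities to supplement your budget.",
     "Track all expenses in real-time and compare against your budget monthly.",
     "Prioritize essential expenses before allocating funds to optional items."]),
  ("policy",
   ["Review campus policies regularly to ensure your activities remain compliant.",
     "All club activities must be approved by the student affairs office.",
     "Ensure all events comply with venue capacity and safety regulations.",
     "Financial transactions must follow university procurement guidelines.",
     "Maintain accurate records of all club activities for audit purposes."]),
  ("general",
   ["I'm here to help with event planning, club management, budget advice, and policy guidance.",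
     "You can ask me about best practices for organizing events or managing clubs.",
     "Need help with a specific aspect of your club or event? I can provide targeted advice.",
     "I can analyze proposals and suggest improvements to help ensure success.",
     "Feel free to ask about policies, budgets, member recruitment, or event logistics."])]

def rule_based_response_py (message : String) (mode : String) : String :=
  let message_lower := PySem.Str.lower message
  let bucket :=
    if ["event", "organize", "schedule", "venue", "activity"].any (fun w => PySem.Str.isIn w message_lower) then "event"
    else if ["club", "member", "recruitment", "leader"].any (fun w => PySem.Str.isIn w message_lower) then "club"
    else if ["budget", "cost", "fund", "spend", "expense", "money"].any (fun w => PySem.Str.isIn w message_lower) then "budget"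
    else if ["policy", "rule", "regulation", "compliance", "guideline"].any (fun w => PySem.Str.isIn w message_lower) then "policy"
    else if chatResponses.contains mode then mode else "general"
  let responses := chatResponses.getD bucket []
  let index := PySem.Int.mod (PySem.Str.len message) (responses.length : Int)
  ((PySem.List.pyGet? responses index).getD "")  -- always some: every bucket has 5 responses

-- ===== PORT B =====
-- the constants _PRIORITY_KEYWORDS and _BUCKET_NAMES of Source B
def priorityKeywords : List (Nat × List String) := [
  (0, ["event", "organize", "schedule", "venue", "activity"]),
  (1, ["club", "member", "recruitment", "leader"]),
  (2, ["budget", "cost", "fund", "spend", "expense", "money"]),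
  (3, ["policy", "rule", "regulation", "compliance", "guideline"])]

def bucketNames : List String := ["event", "club", "budget", "policy"]

-- the inner 'for prio, kws in _PRIORITY_KEYWORDS' loop at one position (suffix l)
def updBest (l : List Char) (best : Option Nat) (row : Nat × List String) : Option Nat :=
  if row.2.any (fun w => PySem.Chars.startswith l w.toList) &&
     (best.isNone || decide (row.1 < best.getD 0)) then some row.1 else best

-- the outer 'for i in range(len(ml))' loop: walk the suffixes of ml left to right
def scanBest (l : List Char) (best : Option Nat) : Option Nat :=
  match l with
  | [] => best
  | _ :: t => scanBest t (priorityKeywords.foldl (updBest l) best)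

def rule_based_response_py_alt (message : String) (mode : String) : String :=
  let ml := PySem.Str.lower message
  let best := scanBest ml.toList none
  let bucket :=
    match best with
    | some p => bucketNames.getD p ""
    | none => if chatResponses.contains mode then mode else "general"
  let responses := chatResponses.getD bucket []
  ((PySem.List.pyGet? responses (PySem.Int.mod (PySem.Str.len message) (responses.length : Int))).getD "")

-- ===== PRECONDITION & SPEC =====
def Spec_rule_based_response_py (message : String) (mode : String) (out : String) : Prop := out = rule_based_response_py_alt message mode
instance (message : String) (mode : String) (out : String) : Decidable (Spec_rule_based_response_py message mode out) := by unfold Spec_rule_based_response_py; infer_instance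

-- ===== CLAIM (what is proved, stated in full; the proofs are below) =====
def Claim_equal_rule_based_response_py : Prop := ∀ (message : String) (mode : String), Dom_rule_based_response_py message mode → Spec_rule_based_response_py message mode (rule_based_response_py message mode)

-- ===== LEMMAS AND PROOFS =====

-- option-min: none acts as +∞
def omin (a b : Option Nat) : Option Nat :=
  match a, b with
  | none, b => b
  | some x, none => some x
  | some x, some y => some (min x y)

theorem omin_none_right (a : Option Nat) : omin a none = a := by cases a <;> rfl

theorem omin_assoc (a b c : Option Nat) : omin (omin a b) c = omin a (omin b c) := by
  cases a <;> cases b <;> cases c <;> simp [omin, Nat.min_assoc]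

theorem updBest_eq (l : List Char) (b : Option Nat) (r : Nat × List String) :
    updBest l b r = omin b (updBest l none r) := by
  unfold updBest
  cases b with
  | none => cases h : r.2.any (fun w => PySem.Chars.startswith l w.toList) <;> simp [omin]
  | some v =>
    cases h : r.2.any (fun w => PySem.Chars.startswith l w.toList) <;> simp [omin]
    split_ifs with hlt <;> simp [Nat.min_def] <;> omega

theorem foldl_updBest_omin (l : List Char) (rows : List (Nat × List String)) (b : Option Nat) :
    rows.foldl (updBest l) b = omin b (rows.foldl (updBest l) none) := by
  induction rows generalizing b with
  | nil => simp [List.foldl, omin_none_right]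
  | cons r rest ih =>
    simp only [List.foldl]
    rw [ih (updBest l b r), updBest_eq, omin_assoc, ← ih (updBest l none r)]

theorem scanBest_omin (l : List Char) (b : Option Nat) :
    scanBest l b = omin b (scanBest l none) := by
  induction l generalizing b with
  | nil => cases b <;> rfl
  | cons c t ih =>
    show scanBest t (priorityKeywords.foldl (updBest (c :: t)) b) = _
    rw [ih, foldl_updBest_omin, omin_assoc, ← ih]
    rfl

-- 'w in (c::t)'  =  '(c::t) startswith w'  ||  'w in t'
theorem isIn_cons (w : List Char) (c : Char) (t : List Char) :
    PySem.Chars.isIn w (c :: t) =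
      (PySem.Chars.startswith (c :: t) w || PySem.Chars.isIn w t) := by
  rw [Bool.eq_iff_iff]
  simp only [PySem.Chars.isIn_iff_infix, PySem.Chars.startswith_iff, Bool.or_eq_true]
  exact List.infix_cons_iff

theorem any_or {α : Type} (xs : List α) (p q : α → Bool) :
    xs.any (fun x => p x || q x) = (xs.any p || xs.any q) := by
  induction xs with
  | nil => rfl
  | cons x rest ih => simp [List.any_cons, ih, Bool.or_assoc, Bool.or_left_comm]

theorem anyIn_cons (kws : List String) (c : Char) (t : List Char) :
    (kws.any fun w => PySem.Chars.isIn w.toList (c :: t)) =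
      ((kws.any fun w => PySem.Chars.startswith (c :: t) w.toList) ||
       (kws.any fun w => PySem.Chars.isIn w.toList t)) := by
  simp only [isIn_cons]
  exact any_or kws _ _

-- the inner 4-row fold at one position, as a priority chain of startswith tests
theorem inner_none (l : List Char) :
    priorityKeywords.foldl (updBest l) none =
      (if (["event", "organize", "schedule", "venue", "activity"].any fun w => PySem.Chars.startswith l w.toList) then some 0
       else if (["club", "member", "recruitment", "leader"].any fun w => PySem.Chars.startswith l w.toList) then some 1
       else if (["budget", "cost", "fund", "spend", "expense", "money"].any fun w => PySem.Chars.startswith l w.toList) then some 2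
       else if (["policy", "rule", "regulation", "compliance", "guideline"].any fun w => PySem.Chars.startswith l w.toList) then some 3
       else none) := by
  simp only [priorityKeywords, List.foldl]
  cases h0 : (["event", "organize", "schedule", "venue", "activity"].any fun w => PySem.Chars.startswith l w.toList) <;>
  cases h1 : (["club", "member", "recruitment", "leader"].any fun w => PySem.Chars.startswith l w.toList) <;>
  cases h2 : (["budget", "cost", "fund", "spend", "expense", "money"].any fun w => PySem.Chars.startswith l w.toList) <;>
  cases h3 : (["policy", "rule", "regulation", "compliance", "guideline"].any fun w => PySem.Chars.startswith l w.toList) <;>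
    simp [updBest, h0, h1, h2, h3]

-- the if/elif chain of A, as a priority (isIn form)
def chainMin (l : List Char) : Option Nat :=
  if (["event", "organize", "schedule", "venue", "activity"].any fun w => PySem.Chars.isIn w.toList l) then some 0
  else if (["club", "member", "recruitment", "leader"].any fun w => PySem.Chars.isIn w.toList l) then some 1
  else if (["budget", "cost", "fund", "spend", "expense", "money"].any fun w => PySem.Chars.isIn w.toList l) then some 2
  else if (["policy", "rule", "regulation", "compliance", "guideline"].any fun w => PySem.Chars.isIn w.toList l) then some 3
  else none

theorem scanBest_eq_chainMin (l : List Char) : scanBest l none = chainMin l := by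
  induction l with
  | nil => decide
  | cons c t ih =>
    show scanBest t (priorityKeywords.foldl (updBest (c :: t)) none) = chainMin (c :: t)
    rw [scanBest_omin, ih, inner_none]
    unfold chainMin
    rw [anyIn_cons, anyIn_cons, anyIn_cons, anyIn_cons]
    cases hs0 : (["event", "organize", "schedule", "venue", "activity"].any fun w => PySem.Chars.startswith (c :: t) w.toList) <;>
    cases hs1 : (["club", "member", "recruitment", "leader"].any fun w => PySem.Chars.startswith (c :: t) w.toList) <;>
    cases hs2 : (["budget", "cost", "fund", "spend", "expense", "money"].any fun w => PySem.Chars.startswith (c :: t) w.toList) <;>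
    cases hs3 : (["policy", "rule", "regulation", "compliance", "guideline"].any fun w => PySem.Chars.startswith (c :: t) w.toList) <;>
    cases hi0 : (["event", "organize", "schedule", "venue", "activity"].any fun w => PySem.Chars.isIn w.toList t) <;>
    cases hi1 : (["club", "member", "recruitment", "leader"].any fun w => PySem.Chars.isIn w.toList t) <;>
    cases hi2 : (["budget", "cost", "fund", "spend", "expense", "money"].any fun w => PySem.Chars.isIn w.toList t) <;>
    cases hi3 : (["policy", "rule", "regulation", "compliance", "guideline"].any fun w => PySem.Chars.isIn w.toList t) <;>
      rfl

-- ===== VERDICT (by name: the statement is the Claim_ definition above) =====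
theorem rule_based_response_py_spec : Claim_equal_rule_based_response_py := by
  intro message mode _
  unfold Spec_rule_based_response_py
  simp only [rule_based_response_py, rule_based_response_py_alt, scanBest_eq_chainMin,
             chainMin, PySem.Str.isIn_eq]
  split_ifs <;> rfl
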